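-- pv_equiv track=rewrite | github.com/PanDAWMS/panda-server | pandaserver/workflow/workflow_utils.py | merge_job_params
-- ===== SOURCE A (Python) =====
-- def merge_job_params(base_params, io_params):
--     new_params = []
--     # remove exec stuff from base_params
--     exec_start = False
--     end_exec = False
--     for tmp_item in base_params:
--         if tmp_item["type"] == "constant" and tmp_item["value"].startswith("-p "):
--             exec_start = True
--             continue
--         if exec_start:
--             if end_exec:
--                 pass
--             elif tmp_item["type"] == "constant" and "padding" not in tmp_item:
--                 end_exec = True
--                 continue
--         if exec_start and not end_exec:
--             continue
--         new_params.append(tmp_item)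
--     # take exec and IO stuff from io_params
--     exec_start = False
--     for tmp_item in io_params:
--         if tmp_item["type"] == "constant" and tmp_item["value"] == "__delimiter__":
--             exec_start = True
--             continue
--         # ignore archive option
--         if tmp_item["type"] == "constant" and tmp_item["value"].startswith("-a "):
--             continue
--         if not exec_start:
--             continue
--         new_params.append(tmp_item)
--     return new_params
-- ===== SOURCE B (Python) =====
-- def merge_job_params(base_params, io_params):
--     # Boundary-finding re-implementation: locate the "-p " start and the exec
--     # terminator in base_params, keep the outside slices; locate "__delimiter__"
--     # in io_params and keep what follows it, minus "-a " constants.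
--     def is_const(it):
--         return it["type"] == "constant"
--
--     start = next((i for i, it in enumerate(base_params)
--                   if is_const(it) and it["value"].startswith("-p ")), None)
--     if start is None:
--         out = list(base_params)
--     else:
--         rest = base_params[start + 1:]
--         end = next((j for j, it in enumerate(rest)
--                     if is_const(it) and not it["value"].startswith("-p ")
--                     and "padding" not in it), None)
--         tail = rest[end + 1:] if end is not None else []
--         out = base_params[:start] + [it for it in tail
--                                      if not (is_const(it) and it["value"].startswith("-p "))]
--
--     d = next((i for i, it in enumerate(io_params)
--               if is_const(it) and it["value"] == "__delimiter__"), None)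
--     if d is None:
--         return out
--     return out + [it for it in io_params[d + 1:]
--                   if not (is_const(it) and (it["value"] == "__delimiter__"
--                                             or it["value"].startswith("-a ")))]
-- ===== Notes on version B (the rewrite author's own statement) =====
-- stated objective: alternative
-- what changed: Replaces A's single-pass flag-machine (exec_start/end_exec state threaded through both loops) with explicit boundary finding: locate the first '-p ' constant and the exec terminator in base_params and the '__delimiter__' constant in io_params, then build the result from take/drop slices plus one filter on each kept tail.
import Mathlib
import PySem

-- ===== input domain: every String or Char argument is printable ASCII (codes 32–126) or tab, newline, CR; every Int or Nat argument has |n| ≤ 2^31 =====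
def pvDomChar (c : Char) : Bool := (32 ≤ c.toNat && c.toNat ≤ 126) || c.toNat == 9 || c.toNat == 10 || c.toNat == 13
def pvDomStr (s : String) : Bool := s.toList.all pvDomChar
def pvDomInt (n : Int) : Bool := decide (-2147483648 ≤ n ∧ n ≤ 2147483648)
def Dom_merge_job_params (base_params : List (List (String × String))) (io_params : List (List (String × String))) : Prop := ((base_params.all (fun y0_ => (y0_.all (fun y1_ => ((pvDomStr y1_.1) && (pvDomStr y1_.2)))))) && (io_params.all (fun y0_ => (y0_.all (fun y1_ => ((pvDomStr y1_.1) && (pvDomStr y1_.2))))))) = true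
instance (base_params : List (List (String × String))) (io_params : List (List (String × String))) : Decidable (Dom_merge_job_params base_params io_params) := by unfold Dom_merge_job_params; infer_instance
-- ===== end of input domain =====

-- B replaces A's flag-driven filtering passes with explicit boundary finding (findIdx? + take/drop slices); objective: alternative decomposition.
-- Items are Python dicts, modelled as association lists; tmp_item["k"] is PySem.Dict.get? (Pre_ keeps it a 'some').

-- dict lookup tmp_item.get("k") shared by both ports (exact: PySem.Dict.get? on the item's pairs)
def pvGetItem (it : List (String × String)) (k : String) : Option String := PySem.Dict.get? ⟨it⟩ k

-- ===== PORT A =====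
-- one iteration of A's first for-loop: state (new_params, exec_start, end_exec)
def mjpStep1 (st : List (List (String × String)) × Bool × Bool) (tmp_item : List (String × String)) :
    List (List (String × String)) × Bool × Bool :=
  let (new_params, exec_start, end_exec) := st
  if pvGetItem tmp_item "type" == some "constant" && PySem.Str.startswith ((pvGetItem tmp_item "value").getD "") "-p " then
    (new_params, true, end_exec)
  else if exec_start && !end_exec && (pvGetItem tmp_item "type" == some "constant") && !(PySem.Dict.contains ⟨tmp_item⟩ "padding") then
    (new_params, exec_start, true)
  else if exec_start && !end_exec then
    (new_params, exec_start, end_exec)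
  else
    (new_params ++ [tmp_item], exec_start, end_exec)

-- one iteration of A's second for-loop: state (new_params, exec_start)
def mjpStep2 (st : List (List (String × String)) × Bool) (tmp_item : List (String × String)) :
    List (List (String × String)) × Bool :=
  let (new_params, exec_start) := st
  if pvGetItem tmp_item "type" == some "constant" && ((pvGetItem tmp_item "value").getD "" == "__delimiter__") then
    (new_params, true)
  else if pvGetItem tmp_item "type" == some "constant" && PySem.Str.startswith ((pvGetItem tmp_item "value").getD "") "-a " then
    (new_params, exec_start)
  else if !exec_start then
    (new_params, exec_start)
  else
    (new_params ++ [tmp_item], exec_start)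

def merge_job_params (base_params : List (List (String × String))) (io_params : List (List (String × String))) : List (List (String × String)) :=
  let s1 := base_params.foldl mjpStep1 ([], false, false)
  let s2 := io_params.foldl mjpStep2 (s1.1, false)
  s2.1

-- ===== PORT B =====
def mjpIsConst (it : List (String × String)) : Bool := pvGetItem it "type" == some "constant"
def mjpVal (it : List (String × String)) : String := (pvGetItem it "value").getD ""
-- "-p " exec-start constant
def mjpPExec (it : List (String × String)) : Bool := mjpIsConst it && PySem.Str.startswith (mjpVal it) "-p "
-- exec terminator: constant, not "-p ", no "padding" key
def mjpTerm (it : List (String × String)) : Bool :=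
  mjpIsConst it && !PySem.Str.startswith (mjpVal it) "-p " && !(PySem.Dict.contains ⟨it⟩ "padding")
-- "__delimiter__" constant
def mjpDelim (it : List (String × String)) : Bool := mjpIsConst it && (mjpVal it == "__delimiter__")
-- io items dropped after the delimiter: another delimiter or an archive "-a " option
def mjpDrop (it : List (String × String)) : Bool :=
  mjpIsConst it && ((mjpVal it == "__delimiter__") || PySem.Str.startswith (mjpVal it) "-a ")

def merge_job_params_alt (base_params : List (List (String × String))) (io_params : List (List (String × String))) : List (List (String × String)) :=
  let out :=
    match base_params.findIdx? mjpPExec with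
    | none => base_params
    | some start =>
      let rest := base_params.drop (start + 1)
      let tail :=
        match rest.findIdx? mjpTerm with
        | some e => rest.drop (e + 1)
        | none => []
      base_params.take start ++ tail.filter (fun it => !mjpPExec it)
  match io_params.findIdx? mjpDelim with
  | none => out
  | some d => out ++ (io_params.drop (d + 1)).filter (fun it => !mjpDrop it)

-- ===== PRECONDITION & SPEC =====
-- Pre_ excludes exactly the inputs where Python A raises KeyError: an item without a
-- "type" key, or a "constant" item without a "value" key (B raises there too).
def Pre_merge_job_params (base_params : List (List (String × String))) (io_params : List (List (String × String))) : Prop :=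
  ∀ it ∈ base_params ++ io_params,
    (pvGetItem it "type").isSome ∧ (pvGetItem it "type" = some "constant" → (pvGetItem it "value").isSome)
instance (base_params : List (List (String × String))) (io_params : List (List (String × String))) : Decidable (Pre_merge_job_params base_params io_params) := by unfold Pre_merge_job_params; infer_instance

def pvWitness_merge_job_params : (List (List (String × String))) × (List (List (String × String))) :=
  ([[("type", "constant"), ("value", "-p x"), ("padding", "1")], [("type", "constant"), ("value", "zzz")], [("type", "template"), ("value", "keepme")]],
   [[("type", "constant"), ("value", "__delimiter__")], [("type", "constant"), ("value", "-a arch")], [("type", "template"), ("value", "io")]])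

def Spec_merge_job_params (base_params : List (List (String × String))) (io_params : List (List (String × String))) (out : List (List (String × String))) : Prop := out = merge_job_params_alt base_params io_params
instance (base_params : List (List (String × String))) (io_params : List (List (String × String))) (out : List (List (String × String))) : Decidable (Spec_merge_job_params base_params io_params out) := by unfold Spec_merge_job_params; infer_instance

-- ===== CLAIM (what is proved, stated in full; the proofs are below) =====
def Claim_equal_merge_job_params : Prop := ∀ (base_params : List (List (String × String))) (io_params : List (List (String × String))), Dom_merge_job_params base_params io_params → Pre_merge_job_params base_params io_params → Spec_merge_job_params base_params io_params (merge_job_params base_params io_params)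

-- ===== LEMMAS AND PROOFS =====

-- branch-order characterisation of A's first loop body in terms of B's predicates
lemma step1_char (st : List (List (String × String)) × Bool × Bool) (x : List (String × String)) :
    mjpStep1 st x =
      if mjpPExec x then (st.1, true, st.2.2)
      else if st.2.1 && !st.2.2 then
        (if mjpTerm x then (st.1, st.2.1, true) else st)
      else (st.1 ++ [x], st.2.1, st.2.2) := by
  obtain ⟨acc, es, ee⟩ := st
  simp only [mjpStep1, mjpPExec, mjpTerm, mjpIsConst, mjpVal]
  generalize (pvGetItem x "type" == some "constant") = c1
  generalize PySem.Str.startswith ((pvGetItem x "value").getD "") "-p " = c2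
  generalize PySem.Dict.contains ⟨x⟩ "padding" = c3
  cases c1 <;> cases c2 <;> cases c3 <;> cases es <;> cases ee <;> simp

-- branch-order characterisation of A's second loop body in terms of B's predicates
lemma step2_char (st : List (List (String × String)) × Bool) (x : List (String × String)) :
    mjpStep2 st x =
      if mjpDelim x then (st.1, true)
      else if st.2 then (if mjpDrop x then st else (st.1 ++ [x], st.2)) else st := by
  obtain ⟨acc, es⟩ := st
  simp only [mjpStep2, mjpDelim, mjpDrop, mjpIsConst, mjpVal]
  generalize (pvGetItem x "type" == some "constant") = c1
  generalize ((pvGetItem x "value").getD "" == "__delimiter__") = c2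
  generalize PySem.Str.startswith ((pvGetItem x "value").getD "") "-a " = c3
  cases c1 <;> cases c2 <;> cases c3 <;> cases es <;> simp

lemma term_of_pexec (x : List (String × String)) (h : mjpPExec x = true) : mjpTerm x = false := by
  simp only [mjpPExec, Bool.and_eq_true] at h
  simp only [mjpTerm, h.2]
  simp

-- loop 1, state (exec_start, end_exec) = (true, true): everything is kept except "-p " constants
lemma foldl1_TT (xs : List (List (String × String))) (acc : List (List (String × String))) :
    xs.foldl mjpStep1 (acc, true, true) = (acc ++ xs.filter (fun it => !mjpPExec it), true, true) := by
  induction xs generalizing acc with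
  | nil => simp
  | cons x xs ih =>
    rw [List.foldl_cons, step1_char]
    by_cases hp : mjpPExec x = true <;> simp [hp, ih]

-- loop 1, state (true, false): nothing kept until the first terminator, then TT filtering
lemma foldl1_TF (xs : List (List (String × String))) (acc : List (List (String × String))) :
    (xs.foldl mjpStep1 (acc, true, false)).1 =
      acc ++ (match xs.findIdx? mjpTerm with
              | some e => (xs.drop (e + 1)).filter (fun it => !mjpPExec it)
              | none => []) := by
  induction xs generalizing acc with
  | nil => simp
  | cons x xs ih =>
    rw [List.foldl_cons, step1_char, List.findIdx?_cons]
    by_cases hp : mjpPExec x = true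
    · rw [term_of_pexec x hp]
      simp only [hp, if_true, if_false, Bool.false_eq_true, ih]
      cases h : xs.findIdx? mjpTerm <;> simp
    · by_cases ht : mjpTerm x = true
      · simp [hp, ht, foldl1_TT]
      · simp only [hp, ht, if_false, Bool.false_eq_true, Bool.true_and, Bool.not_false, if_true, ih]
        cases h : xs.findIdx? mjpTerm <;> simp

-- loop 1 from the initial state
lemma foldl1_FF (xs : List (List (String × String))) (acc : List (List (String × String))) :
    (xs.foldl mjpStep1 (acc, false, false)).1 =
      acc ++ (match xs.findIdx? mjpPExec with
              | none => xs
              | some s =>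
                xs.take s ++ (match (xs.drop (s + 1)).findIdx? mjpTerm with
                              | some e => ((xs.drop (s + 1)).drop (e + 1)).filter (fun it => !mjpPExec it)
                              | none => [])) := by
  induction xs generalizing acc with
  | nil => simp
  | cons x xs ih =>
    rw [List.foldl_cons, step1_char, List.findIdx?_cons]
    by_cases hp : mjpPExec x = true
    · simp only [hp, if_true]
      rw [foldl1_TF]
      simp
    · simp only [hp, if_false, Bool.false_eq_true, Bool.false_and, Bool.not_false, ih]
      cases h : xs.findIdx? mjpPExec <;> simp

-- loop 2, state exec_start = true: keep everything except delimiter / "-a " constants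
lemma foldl2_T (xs : List (List (String × String))) (acc : List (List (String × String))) :
    xs.foldl mjpStep2 (acc, true) = (acc ++ xs.filter (fun it => !mjpDrop it), true) := by
  induction xs generalizing acc with
  | nil => simp
  | cons x xs ih =>
    rw [List.foldl_cons, step2_char]
    by_cases hd : mjpDelim x = true
    · have : mjpDrop x = true := by
        simp only [mjpDelim, Bool.and_eq_true] at hd
        simp [mjpDrop, hd.1, hd.2]
      simp [hd, this, ih]
    · by_cases hr : mjpDrop x = true <;> simp [hd, hr, ih]

-- loop 2 from the initial state: nothing kept until the first delimiter
lemma foldl2_F (xs : List (List (String × String))) (acc : List (List (String × String))) :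
    (xs.foldl mjpStep2 (acc, false)).1 =
      acc ++ (match xs.findIdx? mjpDelim with
              | some d => (xs.drop (d + 1)).filter (fun it => !mjpDrop it)
              | none => []) := by
  induction xs generalizing acc with
  | nil => simp
  | cons x xs ih =>
    rw [List.foldl_cons, step2_char, List.findIdx?_cons]
    by_cases hd : mjpDelim x = true
    · simp [hd, foldl2_T]
    · simp only [hd, if_false, Bool.false_eq_true, ih]
      cases h : xs.findIdx? mjpDelim <;> simp

-- ===== VERDICT (by name: the statement is the Claim_ definition above) =====
theorem merge_job_params_spec : Claim_equal_merge_job_params := by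
  intro base_params io_params _ _
  show merge_job_params base_params io_params = merge_job_params_alt base_params io_params
  unfold merge_job_params merge_job_params_alt
  rw [foldl2_F, foldl1_FF]
  simp only [List.nil_append]
  cases hs : base_params.findIdx? mjpPExec with
  | none => cases io_params.findIdx? mjpDelim <;> simp
  | some s =>
    cases ht : (base_params.drop (s + 1)).findIdx? mjpTerm <;>
      cases io_params.findIdx? mjpDelim <;> simp [ht]
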